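-- pv_equiv track=rewrite | github.com/heinemann44/TCC | Segmentar.py | _separar_linhas
-- ===== SOURCE A (Python) =====
-- def _separar_linhas(lista_letras):
--     linha = []
--     retorno = []
--     altura_linha = lista_letras[0][0]
--     for letra in lista_letras:
--         diferenca_altura = abs(altura_linha - letra[0])
--         if diferenca_altura < 9:
--             linha.append(letra)
--         else:
--             altura_linha = letra[0]
--             retorno.append(linha)
--             linha = []
--             linha.append(letra)
--     retorno.append(linha)
--     return retorno
-- ===== SOURCE B (Python) =====
-- def _separar_linhas(lista_letras):
--     retorno = []
--     resto = lista_letras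
--     while resto:
--         ref = resto[0][0]
--         linha = [resto[0]]
--         i = 1
--         while i < len(resto) and abs(ref - resto[i][0]) < 9:
--             linha.append(resto[i])
--             i += 1
--         retorno.append(linha)
--         resto = resto[i:]
--     return retorno
-- ===== Notes on version B (the rewrite author's own statement) =====
-- stated objective: alternative
-- what changed: Instead of one accumulator loop that rebuilds state (current line, reference height) per element, B repeatedly spans off one whole line at a time: each iteration takes the head as the line's reference, extends the line while the height difference stays below 9, emits it, and continues on the remainder.
import Mathlib
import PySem

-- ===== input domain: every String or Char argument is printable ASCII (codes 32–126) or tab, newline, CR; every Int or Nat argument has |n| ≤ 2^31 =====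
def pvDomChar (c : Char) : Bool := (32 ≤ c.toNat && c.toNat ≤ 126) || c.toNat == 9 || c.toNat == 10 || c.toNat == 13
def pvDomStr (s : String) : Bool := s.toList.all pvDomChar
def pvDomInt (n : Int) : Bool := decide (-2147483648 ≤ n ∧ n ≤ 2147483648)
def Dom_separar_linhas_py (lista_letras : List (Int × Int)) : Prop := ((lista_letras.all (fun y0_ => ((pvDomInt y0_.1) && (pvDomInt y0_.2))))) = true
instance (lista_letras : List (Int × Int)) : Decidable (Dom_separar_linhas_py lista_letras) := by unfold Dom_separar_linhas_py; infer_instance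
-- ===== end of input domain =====

-- B changes the decomposition: it spans off one whole line per outer step instead of threading
-- (line, result, reference height) through a single accumulator loop; same cost (objective: alternative).

-- ===== PORT A =====
-- one step of A's for-loop; state = (altura_linha, retorno, linha)
def stepA (st : Int × List (List (Int × Int)) × List (Int × Int)) (letra : Int × Int) :
    Int × List (List (Int × Int)) × List (Int × Int) :=
  if (st.1 - letra.1).natAbs < 9 then (st.1, st.2.1, st.2.2 ++ [letra])
  else (letra.1, st.2.1 ++ [st.2.2], [letra])

def separar_linhas_py (lista_letras : List (Int × Int)) : List (List (Int × Int)) :=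
  match PySem.List.pyGet? lista_letras 0 with
  | none => []   -- Python raises IndexError here (lista_letras[0]); excluded by Pre_
  | some primeira =>
    let s := lista_letras.foldl stepA (primeira.1, ([], []))
    s.2.1 ++ [s.2.2]

-- ===== PORT B =====
-- B's inner while-loop: extends the line while the height stays within 9 of ref,
-- returning (rest of the line after its head, remaining letters).
def spanLinha (ref : Int) : List (Int × Int) → List (Int × Int) × List (Int × Int)
  | [] => ([], [])
  | y :: ys =>
    if (ref - y.1).natAbs < 9 then
      let s := spanLinha ref ys
      (y :: s.1, s.2)
    else ([], y :: ys)

theorem spanLinha_snd_length_le (ref : Int) (l : List (Int × Int)) :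
    (spanLinha ref l).2.length ≤ l.length := by
  induction l with
  | nil => simp [spanLinha]
  | cons y ys ih =>
    simp only [spanLinha]
    split
    · exact Nat.le_succ_of_le ih
    · simp

-- B's outer while-loop over resto (each emitted line is nonempty, so resto shrinks).
def separar_linhas_py_alt : List (Int × Int) → List (List (Int × Int))
  | [] => []
  | x :: xs =>
    let s := spanLinha x.1 xs
    (x :: s.1) :: separar_linhas_py_alt s.2
termination_by l => l.length
decreasing_by exact Nat.lt_succ_of_le (spanLinha_snd_length_le x.1 xs)

-- ===== PRECONDITION & SPEC =====
-- Pre_ excludes only the empty list, on which Python A raises IndexError.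
def Pre_separar_linhas_py (lista_letras : List (Int × Int)) : Prop := lista_letras ≠ []
instance (lista_letras : List (Int × Int)) : Decidable (Pre_separar_linhas_py lista_letras) := by unfold Pre_separar_linhas_py; infer_instance
def pvWitness_separar_linhas_py : (List (Int × Int)) := [(0, 0), (3, 1), (20, 2)]

def Spec_separar_linhas_py (lista_letras : List (Int × Int)) (out : List (List (Int × Int))) : Prop := out = separar_linhas_py_alt lista_letras
instance (lista_letras : List (Int × Int)) (out : List (List (Int × Int))) : Decidable (Spec_separar_linhas_py lista_letras out) := by unfold Spec_separar_linhas_py; infer_instance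

-- ===== CLAIM (what is proved, stated in full; the proofs are below) =====
def Claim_equal_separar_linhas_py : Prop := ∀ (lista_letras : List (Int × Int)), Dom_separar_linhas_py lista_letras → Pre_separar_linhas_py lista_letras → Spec_separar_linhas_py lista_letras (separar_linhas_py lista_letras)

-- ===== LEMMAS AND PROOFS =====

-- A's loop, run from an arbitrary state, produces the pending lines, the current line
-- completed by the next span, and then B's grouping of the remainder.
theorem loopA_spec (l : List (Int × Int)) :
    ∀ (ref : Int) (acc : List (List (Int × Int))) (line : List (Int × Int)),
    (let s := l.foldl stepA (ref, acc, line); s.2.1 ++ [s.2.2]) =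
      acc ++ ((line ++ (spanLinha ref l).1) :: separar_linhas_py_alt (spanLinha ref l).2) := by
  induction l with
  | nil => intro ref acc line; simp [spanLinha, separar_linhas_py_alt]
  | cons y ys ih =>
    intro ref acc line
    simp only [List.foldl_cons, stepA, spanLinha]
    by_cases h : (ref - y.1).natAbs < 9
    · simp only [h, if_pos]
      have := ih ref acc (line ++ [y])
      simpa [List.append_assoc] using this
    · simp only [h, if_neg, not_false_iff]
      have := ih y.1 (acc ++ [line]) [y]
      simp only [separar_linhas_py_alt]
      simpa [List.append_assoc] using this

-- ===== VERDICT (by name: the statement is the Claim_ definition above) =====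
theorem separar_linhas_py_spec : Claim_equal_separar_linhas_py := by
  intro lista_letras _hdom hpre
  unfold Spec_separar_linhas_py
  obtain ⟨x, xs, rfl⟩ : ∃ y ys, lista_letras = y :: ys := by
    cases lista_letras with
    | nil => exact absurd rfl hpre
    | cons a l => exact ⟨a, l, rfl⟩
  have hg : PySem.List.pyGet? (x :: xs) (0 : Int) = some x := by
    simp [PySem.List.pyGet?, PySem.List.pyIdx?]
  simp only [separar_linhas_py, hg, List.foldl_cons, stepA]
  rw [if_pos (by simp : ((x.1 - x.1).natAbs < 9))]
  have h := loopA_spec xs x.1 [] [x]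
  simp only [List.nil_append] at h ⊢
  rw [h]
  simp [separar_linhas_py_alt]
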